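-- pv_equiv track=rewrite | github.com/dimitri12/cryptology | kryptologi/codeGroup5_II/python/model.py | estimate_key_length
-- ===== SOURCE A (Python) =====
-- def estimate_key_length(results, max_length):
--     """Takes the results from findTriagram() method, and a maximum length for the key,
--     and estimates the key length, returns a list of counters where each index
--     correspond for their following number (+1) in key length estimation. Index = 0 equals the number of
--     samples received"""
--     counters = []
--     samples = len(results)
--
--     while (max_length > 0):
--         counters.append(0)
--         max_length -= 1
--
--     for index, counter in enumerate (counters):
--         #print (str(index + 1))
--         modulus = index + 1
--
--         if (index >= 1):
--             for result in results:
--                 if (result[1] % modulus == 0):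
--                     counters[index] += 1
--         else:
--             counters[index] = samples # the first element of the list contains the number of samples
--                                       # since there's no use on calculate keys of length 1
--     return counters
-- ===== SOURCE B (Python) =====
-- def estimate_key_length(results, max_length):
--     if max_length <= 0:
--         return []
--     counters = [0] * max_length
--     counters[0] = len(results)
--     for result in results:
--         n = abs(result[1])
--         if n == 0:
--             for m in range(2, max_length + 1):
--                 counters[m - 1] += 1
--         else:
--             i = 1
--             while i * i <= n:
--                 if n % i == 0:
--                     j = n // i
--                     if 2 <= i <= max_length:
--                         counters[i - 1] += 1
--                     if j != i and 2 <= j <= max_length: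
--                         counters[j - 1] += 1
--                 i += 1
--     return counters
-- ===== Notes on version B (the rewrite author's own statement) =====
-- stated objective: alternative
-- what changed: A scans the whole results list once per candidate modulus; B makes a single pass over the results and enumerates the divisors of each |distance| up to its square root, incrementing the counter of every divisor that is a valid key length (distance 0 counts for every modulus).
import Mathlib
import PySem

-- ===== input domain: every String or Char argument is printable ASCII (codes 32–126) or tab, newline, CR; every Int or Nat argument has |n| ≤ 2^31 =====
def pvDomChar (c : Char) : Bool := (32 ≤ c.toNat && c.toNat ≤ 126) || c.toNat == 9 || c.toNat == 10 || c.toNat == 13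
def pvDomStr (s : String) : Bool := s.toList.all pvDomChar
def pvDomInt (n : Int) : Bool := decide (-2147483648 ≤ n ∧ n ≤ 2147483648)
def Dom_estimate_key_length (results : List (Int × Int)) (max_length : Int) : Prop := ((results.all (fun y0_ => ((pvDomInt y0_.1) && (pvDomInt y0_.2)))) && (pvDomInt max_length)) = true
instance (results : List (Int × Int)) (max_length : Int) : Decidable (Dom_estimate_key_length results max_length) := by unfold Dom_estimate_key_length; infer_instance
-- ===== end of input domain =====

-- B replaces A's per-modulus scan of all results by a single pass over the results that
-- enumerates the divisors of each distance up to its square root (objective: alternative).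

-- ===== PORT A =====
-- `while (max_length > 0): counters.append(0); max_length -= 1`
-- (structural recursion on a fuel that only totalizes the loop: max_length.toNat iterations remain)
def pvZerosLoopF : Nat → List Int → Int → List Int
  | 0, counters, _ => counters
  | fuel + 1, counters, max_length =>
      if max_length > 0 then pvZerosLoopF fuel (counters ++ [(0 : Int)]) (max_length - 1)
      else counters

def pvZerosLoop (counters : List Int) (max_length : Int) : List Int :=
  pvZerosLoopF max_length.toNat counters max_length

-- Port of A.  The Python `for index, counter in enumerate(counters)` iterates the live list,
-- but its length never changes and the bound value `counter` is never used, so enumerating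
-- the initial list is exact.
def estimate_key_length (results : List (Int × Int)) (max_length : Int) : List Int :=
  let counters := pvZerosLoop [] max_length
  let samples : Int := results.length
  (PySem.List.enumerate counters 0).foldl (fun cs ic =>
    let index := ic.1
    let modulus := index + 1
    if index ≥ 1 then
      results.foldl (fun cs r =>
        if PySem.Int.mod r.2 modulus = 0 then
          PySem.List.pySetD cs index (PySem.List.pyGetD cs index 0 + 1)
        else cs) cs
    else PySem.List.pySetD cs index samples) counters

-- ===== PORT B =====
-- `counters[m-1] += 1`
def pvIncAt (cs : List Int) (m : Int) : List Int :=
  PySem.List.pySetD cs (m - 1) (PySem.List.pyGetD cs (m - 1) 0 + 1)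

-- the `while i * i <= n:` divisor-enumeration loop of Source B
-- (structural recursion on a fuel that only totalizes the loop: i*i ≤ n forces i ≤ n,
-- so (n + 1 - i).toNat iterations always remain)
def pvDivLoopF : Nat → Int → Int → Int → List Int → List Int
  | 0, _, _, _, cs => cs
  | fuel + 1, n, max_length, i, cs =>
    if i * i ≤ n then
    let cs1 :=
      if PySem.Int.mod n i = 0 then
        let j := PySem.Int.floordiv n i
        let cs2 := if 2 ≤ i ∧ i ≤ max_length then pvIncAt cs i else cs
        if j ≠ i ∧ 2 ≤ j ∧ j ≤ max_length then pvIncAt cs2 j else cs2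
      else cs
    pvDivLoopF fuel n max_length (i + 1) cs1
    else cs

def pvDivLoop (n max_length : Int) (i : Int) (cs : List Int) : List Int :=
  pvDivLoopF (n + 1 - i).toNat n max_length i cs

def estimate_key_length_alt (results : List (Int × Int)) (max_length : Int) : List Int :=
  if max_length ≤ 0 then []
  else
    let counters := List.replicate max_length.toNat (0 : Int)
    let counters := PySem.List.pySetD counters 0 (results.length : Int)
    results.foldl (fun cs r =>
      let n := |r.2|
      if n = 0 then
        (PySem.List.pyRange 2 (max_length + 1) 1).foldl (fun cs m => pvIncAt cs m) cs
      else pvDivLoop n max_length 1 cs) counters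

-- ===== PRECONDITION & SPEC =====
def Spec_estimate_key_length (results : List (Int × Int)) (max_length : Int) (out : List Int) : Prop := out = estimate_key_length_alt results max_length
instance (results : List (Int × Int)) (max_length : Int) (out : List Int) : Decidable (Spec_estimate_key_length results max_length out) := by unfold Spec_estimate_key_length; infer_instance

-- ===== CLAIM (what is proved, stated in full; the proofs are below) =====
def Claim_equal_estimate_key_length : Prop := ∀ (results : List (Int × Int)) (max_length : Int), Dom_estimate_key_length results max_length → Spec_estimate_key_length results max_length (estimate_key_length results max_length)

-- ===== LEMMAS AND PROOFS =====

-- a loop guard i*i ≤ n bounds i (used for pvS's termination and the loop invariants)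
theorem pv_le_of_sq_le {i n : Int} (h : i * i ≤ n) : i ≤ n := by
  have h1 : i ≤ i * i := by
    have h2 := Int.le_self_sq i
    rwa [sq] at h2
  exact h1.trans h

theorem pv_div_dec {i n : Int} (h : i * i ≤ n) : (n + 1 - (i + 1)).toNat < (n + 1 - i).toNat := by
  have h1 := pv_le_of_sq_le h
  omega

-- the common reference value: position 0 holds the sample count, position p ≥ 1 the number
-- of results whose distance is divisible by p+1
def refVal (results : List (Int × Int)) (p : Nat) : Int :=
  if p = 0 then (results.length : Int)
  else (results.countP (fun r => decide (((p : Int) + 1) ∣ r.2)) : Int)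

-- contribution of a single loop iteration t of pvDivLoop to position p
def pvContrib (n ml : Int) (p : Nat) (t : Int) : Int :=
  if PySem.Int.mod n t = 0 then
    (if 2 ≤ t ∧ t ≤ ml ∧ (p : Int) = t - 1 then 1 else 0) +
    (if PySem.Int.floordiv n t ≠ t ∧ 2 ≤ PySem.Int.floordiv n t ∧
        PySem.Int.floordiv n t ≤ ml ∧ (p : Int) = PySem.Int.floordiv n t - 1 then 1 else 0)
  else 0

-- total contribution of iterations i, i+1, … of pvDivLoop to position p
def pvS (n ml : Int) (p : Nat) (i : Int) : Int :=
  if i * i ≤ n then pvContrib n ml p i + pvS n ml p (i + 1) else 0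
termination_by (n + 1 - i).toNat
decreasing_by exact pv_div_dec (by assumption)

lemma zerosLoopF_eq : ∀ (fuel : Nat) (ml : Int) (cs : List Int), ml.toNat ≤ fuel →
    pvZerosLoopF fuel cs ml = cs ++ List.replicate ml.toNat 0 := by
  intro fuel
  induction fuel with
  | zero =>
      intro ml cs h
      have h2 : ml.toNat = 0 := by omega
      simp [pvZerosLoopF, h2]
  | succ k ih =>
      intro ml cs h
      by_cases hml : ml > 0
      · rw [pvZerosLoopF, if_pos hml, ih (ml - 1) _ (by omega)]
        have h2 : ml.toNat = (ml - 1).toNat + 1 := by omega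
        rw [h2, List.replicate_succ]
        simp
      · rw [pvZerosLoopF, if_neg hml]
        have h2 : ml.toNat = 0 := by omega
        simp [h2]

lemma zerosLoop_eq (max_length : Int) : ∀ cs, pvZerosLoop cs max_length = cs ++ List.replicate max_length.toNat 0 := by
  intro cs
  exact zerosLoopF_eq max_length.toNat max_length cs le_rfl

lemma eq_of_getD (l₁ l₂ : List Int) (h : l₁.length = l₂.length)
    (hg : ∀ p, l₁.getD p 0 = l₂.getD p 0) : l₁ = l₂ := by
  apply List.ext_getElem h
  intro i h1 h2
  have := hg i
  rwa [List.getD_eq_getElem l₁ 0 h1, List.getD_eq_getElem l₂ 0 h2] at this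

lemma inc_len (cs : List Int) (idx v : Int) : (PySem.List.pySetD cs idx v).length = cs.length := by
  simp [PySem.List.length_pySetD]

lemma inc_getD (cs : List Int) (idx : Int) (h0 : 0 ≤ idx) (h1 : idx < (cs.length : Int)) (p : Nat) :
    (PySem.List.pySetD cs idx (PySem.List.pyGetD cs idx 0 + 1)).getD p 0
      = cs.getD p 0 + (if (p : Int) = idx then 1 else 0) := by
  rw [PySem.List.pySetD_of_nonneg _ _ h0, PySem.List.pyGetD_of_nonneg _ _ h0]
  simp only [List.getD_eq_getElem?_getD, List.getElem?_set]
  by_cases he : (p : Int) = idx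
  · have h3 : idx.toNat = p := by omega
    have h4 : p < cs.length := by omega
    simp [h3, he, h4]
  · have h3 : ¬ (idx.toNat = p) := by omega
    simp [h3, he]

lemma incAt_len (cs : List Int) (m : Int) : (pvIncAt cs m).length = cs.length := by
  simpa [pvIncAt] using inc_len cs (m - 1) _

lemma incAt_getD (cs : List Int) (m : Int) (h0 : 1 ≤ m) (h1 : m ≤ (cs.length : Int)) (p : Nat) :
    (pvIncAt cs m).getD p 0 = cs.getD p 0 + (if (p : Int) = m - 1 then 1 else 0) := by
  simpa [pvIncAt] using inc_getD cs (m - 1) (by omega) (by omega) p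

-- A's inner loop: repeated increment at one index counts the matching results
lemma innerA_spec (results : List (Int × Int)) (idx modulus : Int) (h0 : 0 ≤ idx) :
    ∀ cs : List Int, idx < (cs.length : Int) →
      (results.foldl (fun cs r =>
          if PySem.Int.mod r.2 modulus = 0 then
            PySem.List.pySetD cs idx (PySem.List.pyGetD cs idx 0 + 1)
          else cs) cs).length = cs.length ∧
      ∀ p : Nat,
        (results.foldl (fun cs r =>
            if PySem.Int.mod r.2 modulus = 0 then
              PySem.List.pySetD cs idx (PySem.List.pyGetD cs idx 0 + 1)
            else cs) cs).getD p 0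
          = cs.getD p 0 + (if (p : Int) = idx then
              (results.countP (fun r => decide (PySem.Int.mod r.2 modulus = 0)) : Int) else 0) := by
  induction results with
  | nil => intro cs hlen; simp
  | cons r rs ih =>
      intro cs hlen
      by_cases hc : PySem.Int.mod r.2 modulus = 0
      · have hlen1 := inc_len cs idx (PySem.List.pyGetD cs idx 0 + 1)
        obtain ⟨ihl, ihg⟩ := ih _ (by rw [hlen1]; exact hlen)
        constructor
        · simp only [List.foldl_cons, if_pos hc]
          rw [ihl, hlen1]
        · intro p
          simp only [List.foldl_cons, if_pos hc]
          rw [ihg p, inc_getD cs idx h0 hlen p, List.countP_cons]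
          simp only [hc, decide_true, if_true]
          push_cast
          split_ifs <;> ring
      · obtain ⟨ihl, ihg⟩ := ih cs hlen
        constructor
        · simp only [List.foldl_cons, if_neg hc]
          exact ihl
        · intro p
          simp only [List.foldl_cons, if_neg hc]
          rw [ihg p, List.countP_cons]
          simp [hc]

-- B's range loop (case distance = 0): one increment at every position 1 … max_length-1
lemma incRange_spec (b : Int) : ∀ (a : Int) (cs : List Int), 1 ≤ a → b ≤ (cs.length : Int) + 1 →
    ((PySem.List.pyRange a b 1).foldl (fun cs m => pvIncAt cs m) cs).length = cs.length ∧
    ∀ p : Nat, ((PySem.List.pyRange a b 1).foldl (fun cs m => pvIncAt cs m) cs).getD p 0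
      = cs.getD p 0 + (if a ≤ (p : Int) + 1 ∧ (p : Int) + 1 < b then 1 else 0) := by
  intro a cs
  induction h : (b - a).toNat generalizing a cs with
  | zero =>
      intro h1 h2
      rw [PySem.List.pyRange_one_eq_nil (by omega)]
      constructor
      · rfl
      · intro p
        rw [if_neg (by omega)]
        simp
  | succ k ih =>
      intro h1 h2
      have hab : a < b := by omega
      rw [PySem.List.pyRange_one_cons hab]
      have hlen1 := incAt_len cs a
      obtain ⟨ihl, ihg⟩ := ih (a + 1) (pvIncAt cs a) (by omega) (by omega) (by rw [hlen1]; omega)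
      constructor
      · simp only [List.foldl_cons]
        rw [ihl, hlen1]
      · intro p
        simp only [List.foldl_cons]
        rw [ihg p, incAt_getD cs a (by omega) (by omega) p]
        split_ifs <;> omega

-- pvDivLoop adds pvS to every position
lemma divLoop_spec (n ml : Int) : ∀ (i : Int) (cs : List Int), ml ≤ (cs.length : Int) →
    (pvDivLoop n ml i cs).length = cs.length ∧
    ∀ p : Nat, (pvDivLoop n ml i cs).getD p 0 = cs.getD p 0 + pvS n ml p i := by
  have key : ∀ (i : Int) (cs : List Int), ml ≤ (cs.length : Int) → PySem.Int.mod n i = 0 →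
      ((let j := PySem.Int.floordiv n i
        let cs2 := if 2 ≤ i ∧ i ≤ ml then pvIncAt cs i else cs
        if j ≠ i ∧ 2 ≤ j ∧ j ≤ ml then pvIncAt cs2 j else cs2 : List Int)).length = cs.length ∧
      ∀ p : Nat, ((let j := PySem.Int.floordiv n i
        let cs2 := if 2 ≤ i ∧ i ≤ ml then pvIncAt cs i else cs
        if j ≠ i ∧ 2 ≤ j ∧ j ≤ ml then pvIncAt cs2 j else cs2 : List Int)).getD p 0
        = cs.getD p 0 + pvContrib n ml p i := by
    intro i cs hml hmod
    constructor
    · dsimp only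
      split_ifs <;> simp [incAt_len]
    · intro p
      rw [pvContrib, if_pos hmod]
      dsimp only
      by_cases c1 : 2 ≤ i ∧ i ≤ ml
      · rw [if_pos c1]
        by_cases c2 : PySem.Int.floordiv n i ≠ i ∧ 2 ≤ PySem.Int.floordiv n i ∧
            PySem.Int.floordiv n i ≤ ml
        · rw [if_pos c2, incAt_getD _ _ (by omega) (by rw [incAt_len]; omega) p,
            incAt_getD _ _ (by omega) (by omega) p]
          split_ifs <;> omega
        · rw [if_neg c2, incAt_getD _ _ (by omega) (by omega) p]
          split_ifs <;> omega
      · rw [if_neg c1]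
        by_cases c2 : PySem.Int.floordiv n i ≠ i ∧ 2 ≤ PySem.Int.floordiv n i ∧
            PySem.Int.floordiv n i ≤ ml
        · rw [if_pos c2, incAt_getD _ _ (by omega) (by omega) p]
          split_ifs <;> omega
        · rw [if_neg c2]
          split_ifs <;> omega
  have main : ∀ (fuel : Nat) (i : Int) (cs : List Int), (n + 1 - i).toNat ≤ fuel →
      ml ≤ (cs.length : Int) →
      (pvDivLoopF fuel n ml i cs).length = cs.length ∧
      ∀ p : Nat, (pvDivLoopF fuel n ml i cs).getD p 0 = cs.getD p 0 + pvS n ml p i := by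
    intro fuel
    induction fuel with
    | zero =>
        intro i cs hf _
        have hni : ¬ i * i ≤ n := by
          intro hle
          have := pv_le_of_sq_le hle
          omega
        rw [pvDivLoopF]
        refine ⟨rfl, fun p => ?_⟩
        rw [pvS, if_neg hni]
        simp
    | succ k ih =>
        intro i cs hf hml
        by_cases hle : i * i ≤ n
        · have hin : i ≤ n := pv_le_of_sq_le hle
          rw [pvDivLoopF, if_pos hle]
          by_cases hmod : PySem.Int.mod n i = 0
          · rw [if_pos hmod]
            obtain ⟨kl, kg⟩ := key i cs hml hmod
            obtain ⟨ihl, ihg⟩ := ih (i + 1) _ (by omega) (by rw [kl]; exact hml)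
            refine ⟨ihl.trans kl, fun p => ?_⟩
            rw [ihg p, kg p]
            conv_rhs => rw [pvS]
            rw [if_pos hle]
            ring
          · rw [if_neg hmod]
            obtain ⟨ihl, ihg⟩ := ih (i + 1) cs (by omega) hml
            refine ⟨ihl, fun p => ?_⟩
            rw [ihg p]
            conv_rhs => rw [pvS]
            rw [if_pos hle, pvContrib, if_neg hmod]
            ring
        · rw [pvDivLoopF, if_neg hle]
          refine ⟨rfl, fun p => ?_⟩
          rw [pvS, if_neg hle]
          simp
  intro i cs hml
  exact main (n + 1 - i).toNat i cs le_rfl hml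

lemma pvS_zero (n ml : Int) (p : Nat) : ∀ i : Int,
    (∀ t : Int, i ≤ t → t * t ≤ n → pvContrib n ml p t = 0) → pvS n ml p i = 0 := by
  intro i
  induction hk : (n + 1 - i).toNat generalizing i with
  | zero =>
      intro _
      have hni : ¬ i * i ≤ n := by
        intro hle
        have : i ≤ n := by nlinarith [sq_nonneg i]
        omega
      rw [pvS, if_neg hni]
  | succ k ih =>
      intro h
      by_cases hle : i * i ≤ n
      · have hin : i ≤ n := by nlinarith [sq_nonneg i]
        rw [pvS, if_pos hle, h i le_rfl hle,
          ih (i + 1) (by omega) (fun t ht => h t (by omega))]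
        ring
      · rw [pvS, if_neg hle]

lemma pvS_single (n ml : Int) (p : Nat) (t₀ : Int) (ht : t₀ * t₀ ≤ n) : ∀ i : Int, 1 ≤ i → i ≤ t₀ →
    (∀ t : Int, i ≤ t → t * t ≤ n → t ≠ t₀ → pvContrib n ml p t = 0) →
    pvS n ml p i = pvContrib n ml p t₀ := by
  have ht0n : t₀ ≤ n := by nlinarith [sq_nonneg t₀]
  intro i
  induction hk : (n + 1 - i).toNat generalizing i with
  | zero => intro h1 h2 _; omega
  | succ k ih =>
      intro h1 h2 hu
      by_cases he : i = t₀
      · subst he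
        rw [pvS, if_pos ht,
          pvS_zero n ml p (i + 1) (fun t ht1 ht2 => hu t (by omega) ht2 (by omega))]
        ring
      · have hlt : i < t₀ := lt_of_le_of_ne h2 he
        have hii : i * i ≤ n := by
          have h3 : i * i ≤ t₀ * t₀ := mul_le_mul h2 h2 (by omega) (by omega)
          omega
        rw [pvS, if_pos hii, hu i le_rfl hii he,
          ih (i + 1) (by omega) (by omega) (by omega) (fun t ht1 => hu t (by omega))]
        ring

-- the divisor-pair enumeration counts each admissible divisor exactly once
lemma pvS_eval' (n ml m : Int) (hn : 1 ≤ n) (p : Nat) (hpm : (p : Int) = m - 1) :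
    pvS n ml p 1 = if 2 ≤ m ∧ m ≤ ml ∧ m ∣ n then 1 else 0 := by
  by_cases hc : 2 ≤ m ∧ m ≤ ml ∧ m ∣ n
  · obtain ⟨hm2, hmml, k, hk⟩ := hc
    have hk1 : 1 ≤ k := by
      by_contra hneg
      have : m * k ≤ 0 := mul_nonpos_of_nonneg_of_nonpos (by omega) (by omega)
      omega
    rw [if_pos ⟨hm2, hmml, k, hk⟩]
    by_cases hsq : m * m ≤ n
    · -- the loop counts m itself, at iteration i = m
      have hcm : pvContrib n ml p m = 1 := by
        have hmod : PySem.Int.mod n m = 0 := (PySem.Int.mod_eq_zero_iff_dvd n m).mpr ⟨k, hk⟩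
        have hfd : PySem.Int.floordiv n m = k := by
          rw [PySem.Int.floordiv_eq_ediv_of_pos (by omega), hk,
            Int.mul_ediv_cancel_left _ (by omega)]
        rw [pvContrib, if_pos hmod, hfd, if_pos ⟨hm2, hmml, by omega⟩, if_neg (by omega)]
        norm_num
      have huniq : ∀ t : Int, 1 ≤ t → t * t ≤ n → t ≠ m → pvContrib n ml p t = 0 := by
        intro t ht1 ht2 hne
        rw [pvContrib]
        by_cases hmod : PySem.Int.mod n t = 0
        · obtain ⟨q, hq⟩ := (PySem.Int.mod_eq_zero_iff_dvd n t).mp hmod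
          have hfd : PySem.Int.floordiv n t = q := by
            rw [PySem.Int.floordiv_eq_ediv_of_pos (by omega), hq,
              Int.mul_ediv_cancel_left _ (by omega)]
          rw [if_pos hmod, hfd, if_neg (by omega), if_neg ?_]
          · norm_num
          · rintro ⟨hqt, hq2, hqml, hpq⟩
            have hqm : q = m := by omega
            rw [hqm] at hq hqt
            have hcomm : k * m = m * k := mul_comm k m
            have hcomm2 : t * m = m * t := mul_comm t m
            have h2 : t * m = k * m := by omega
            have htk : t = k := mul_right_cancel₀ (by omega : m ≠ 0) h2
            have hmk : m ≤ k := le_of_mul_le_mul_left (by omega : m * m ≤ m * k) (by omega)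
            have hlt : 0 < (k - m) * k := mul_pos (by omega) (by omega)
            have hexp : (k - m) * k = k * k - k * m := by ring
            have hcomm3 : k * m = m * k := mul_comm k m
            rw [htk] at ht2
            omega
        · rw [if_neg hmod]
      rw [pvS_single n ml p m hsq 1 (by omega) (by omega) huniq, hcm]
    · -- m exceeds √n: the loop counts m as the cofactor of k = n / m, at iteration i = k
      have hkm : k < m := by
        have h1 : m * k < m * m := by omega
        exact lt_of_mul_lt_mul_left h1 (by omega)
      have hksq : k * k ≤ n := by
        have hlt : 0 ≤ (m - k) * k := mul_nonneg (by omega) (by omega)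
        have hexp : (m - k) * k = m * k - k * k := by ring
        omega
      have hck : pvContrib n ml p k = 1 := by
        have hmodk : PySem.Int.mod n k = 0 :=
          (PySem.Int.mod_eq_zero_iff_dvd n k).mpr ⟨m, by rw [hk]; ring⟩
        have hfdk : PySem.Int.floordiv n k = m := by
          rw [PySem.Int.floordiv_eq_ediv_of_pos (by omega), hk, mul_comm,
            Int.mul_ediv_cancel_left _ (by omega)]
        rw [pvContrib, if_pos hmodk, hfdk, if_neg (by omega),
          if_pos ⟨by omega, hm2, hmml, by omega⟩]
        norm_num
      have huniq : ∀ t : Int, 1 ≤ t → t * t ≤ n → t ≠ k → pvContrib n ml p t = 0 := by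
        intro t ht1 ht2 hne
        rw [pvContrib]
        by_cases hmod : PySem.Int.mod n t = 0
        · obtain ⟨q, hq⟩ := (PySem.Int.mod_eq_zero_iff_dvd n t).mp hmod
          have hfd : PySem.Int.floordiv n t = q := by
            rw [PySem.Int.floordiv_eq_ediv_of_pos (by omega), hq,
              Int.mul_ediv_cancel_left _ (by omega)]
          rw [if_pos hmod, hfd, if_neg ?_, if_neg ?_]
          · norm_num
          · rintro ⟨hqt, hq2, hqml, hpq⟩
            have hqm : q = m := by omega
            rw [hqm] at hq
            have hcomm : k * m = m * k := mul_comm k m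
            have hcomm2 : t * m = m * t := mul_comm t m
            have h2 : t * m = k * m := by omega
            exact hne (mul_right_cancel₀ (by omega : m ≠ 0) h2)
          · rintro ⟨ht2', html, hpt⟩
            rw [show t = m from by omega] at ht2
            omega
        · rw [if_neg hmod]
      rw [pvS_single n ml p k hksq 1 (by omega) hk1 huniq, hck]
  · rw [if_neg hc]
    apply pvS_zero
    intro t ht1 ht2
    rw [pvContrib]
    by_cases hmod : PySem.Int.mod n t = 0
    · obtain ⟨q, hq⟩ := (PySem.Int.mod_eq_zero_iff_dvd n t).mp hmod
      have hfd : PySem.Int.floordiv n t = q := by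
        rw [PySem.Int.floordiv_eq_ediv_of_pos (by omega), hq,
          Int.mul_ediv_cancel_left _ (by omega)]
      rw [if_pos hmod, hfd, if_neg ?_, if_neg ?_]
      · norm_num
      · rintro ⟨hqt, hq2, hqml, hpq⟩
        rw [show q = m from by omega] at hq
        exact hc ⟨by omega, by omega, ⟨t, by rw [hq]; ring⟩⟩
      · rintro ⟨ht2', html, hpt⟩
        rw [show t = m from by omega] at hq
        exact hc ⟨by omega, by omega, ⟨q, hq⟩⟩
    · rw [if_neg hmod]

lemma pvS_eval (n ml : Int) (hn : 1 ≤ n) (p : Nat) :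
    pvS n ml p 1 = if 2 ≤ (p : Int) + 1 ∧ (p : Int) + 1 ≤ ml ∧ ((p : Int) + 1) ∣ n then 1 else 0 :=
  pvS_eval' n ml ((p : Int) + 1) hn p (by omega)

-- one result processed by B changes position p by the divisibility indicator
lemma stepB_spec (ml : Int) (r : Int × Int) (cs : List Int) (hml : ml = (cs.length : Int)) :
    ((if |r.2| = 0 then
        (PySem.List.pyRange 2 (ml + 1) 1).foldl (fun cs m => pvIncAt cs m) cs
      else pvDivLoop |r.2| ml 1 cs)).length = cs.length ∧
    ∀ p : Nat, ((if |r.2| = 0 then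
        (PySem.List.pyRange 2 (ml + 1) 1).foldl (fun cs m => pvIncAt cs m) cs
      else pvDivLoop |r.2| ml 1 cs)).getD p 0
      = cs.getD p 0 + (if 1 ≤ p ∧ (p : Int) + 1 ≤ ml ∧ ((p : Int) + 1) ∣ r.2 then 1 else 0) := by
  constructor
  · by_cases h0 : |r.2| = 0
    · rw [if_pos h0]
      exact (incRange_spec (ml + 1) 2 cs (by omega) (by omega)).1
    · rw [if_neg h0]
      exact (divLoop_spec |r.2| ml 1 cs (by omega)).1
  · intro p
    by_cases h0 : |r.2| = 0
    · rw [if_pos h0, (incRange_spec (ml + 1) 2 cs (by omega) (by omega)).2 p]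
      have hz : r.2 = 0 := abs_eq_zero.mp h0
      have hAB : (2 ≤ (p : Int) + 1 ∧ (p : Int) + 1 < ml + 1)
          ↔ (1 ≤ p ∧ (p : Int) + 1 ≤ ml ∧ ((p : Int) + 1) ∣ r.2) := by
        constructor
        · rintro ⟨a, b⟩
          exact ⟨by omega, by omega, by rw [hz]; exact dvd_zero _⟩
        · rintro ⟨a, b, c⟩
          omega
      rw [show (if 2 ≤ (p : Int) + 1 ∧ (p : Int) + 1 < ml + 1 then (1 : Int) else 0)
            = (if 1 ≤ p ∧ (p : Int) + 1 ≤ ml ∧ ((p : Int) + 1) ∣ r.2 then 1 else 0) from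
          if_congr hAB rfl rfl]
    · have habs : 0 ≤ |r.2| := abs_nonneg _
      rw [if_neg h0, (divLoop_spec |r.2| ml 1 cs (by omega)).2 p,
        pvS_eval |r.2| ml (by omega) p]
      have hAB : (2 ≤ (p : Int) + 1 ∧ (p : Int) + 1 ≤ ml ∧ ((p : Int) + 1) ∣ |r.2|)
          ↔ (1 ≤ p ∧ (p : Int) + 1 ≤ ml ∧ ((p : Int) + 1) ∣ r.2) := by
        constructor
        · rintro ⟨a, b, c⟩
          exact ⟨by omega, b, (dvd_abs _ _).mp c⟩
        · rintro ⟨a, b, c⟩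
          exact ⟨by omega, b, (dvd_abs _ _).mpr c⟩
      rw [show (if 2 ≤ (p : Int) + 1 ∧ (p : Int) + 1 ≤ ml ∧ ((p : Int) + 1) ∣ |r.2| then (1 : Int) else 0)
            = (if 1 ≤ p ∧ (p : Int) + 1 ≤ ml ∧ ((p : Int) + 1) ∣ r.2 then 1 else 0) from
          if_congr hAB rfl rfl]

-- B's outer fold accumulates the per-result indicators into countP
lemma foldB_spec (ml : Int) (results : List (Int × Int)) : ∀ cs : List Int, ml = (cs.length : Int) →
    (results.foldl (fun cs r =>
        if |r.2| = 0 then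
          (PySem.List.pyRange 2 (ml + 1) 1).foldl (fun cs m => pvIncAt cs m) cs
        else pvDivLoop |r.2| ml 1 cs) cs).length = cs.length ∧
    ∀ p : Nat, (results.foldl (fun cs r =>
        if |r.2| = 0 then
          (PySem.List.pyRange 2 (ml + 1) 1).foldl (fun cs m => pvIncAt cs m) cs
        else pvDivLoop |r.2| ml 1 cs) cs).getD p 0
      = cs.getD p 0 + (if 1 ≤ p ∧ (p : Int) + 1 ≤ ml then
          (results.countP (fun r => decide (((p : Int) + 1) ∣ r.2)) : Int) else 0) := by
  induction results with
  | nil => intro cs hml; simp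
  | cons r rs ih =>
      intro cs hml
      obtain ⟨sl, sg⟩ := stepB_spec ml r cs hml
      obtain ⟨ihl, ihg⟩ := ih _ (by rw [sl]; exact hml)
      refine ⟨ihl.trans sl, fun p => ?_⟩
      simp only [List.foldl_cons]
      rw [ihg p, sg p, List.countP_cons]
      by_cases hd : ((p : Int) + 1) ∣ r.2
      · by_cases hB : 1 ≤ p ∧ (p : Int) + 1 ≤ ml
        · rw [if_pos (⟨hB.1, hB.2, hd⟩ : 1 ≤ p ∧ (p : Int) + 1 ≤ ml ∧ ((p : Int) + 1) ∣ r.2),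
            if_pos hB, if_pos hB]
          simp only [hd, decide_true, if_true]
          push_cast
          ring
        · rw [if_neg (fun h => hB ⟨h.1, h.2.1⟩), if_neg hB, if_neg hB]
          ring
      · by_cases hB : 1 ≤ p ∧ (p : Int) + 1 ≤ ml
        · rw [if_neg (fun h => hd h.2.2), if_pos hB, if_pos hB]
          simp [hd]
        · rw [if_neg (fun h => hd h.2.2), if_neg hB, if_neg hB]
          ring

lemma set_getD (cs : List Int) (k : Nat) (L : Int) (hk : k < cs.length) (p : Nat) :
    (cs.set k L).getD p 0 = if p = k then L else cs.getD p 0 := by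
  simp only [List.getD_eq_getElem?_getD, List.getElem?_set]
  by_cases he : p = k
  · simp [he, hk]
  · have hne : k ≠ p := fun h => he h.symm
    simp [he, hne]

lemma replicate_getD (N p : Nat) : (List.replicate N (0 : Int)).getD p 0 = 0 := by
  simp only [List.getD_eq_getElem?_getD, List.getElem?_replicate]
  split_ifs <;> simp

lemma ref_getD (f : Nat → Int) (N p : Nat) :
    ((List.range N).map f).getD p 0 = if p < N then f p else 0 := by
  by_cases hp : p < N
  · simp [List.getD_eq_getElem?_getD, List.getElem?_map, List.getElem?_range, hp]
  · rw [List.getD_eq_getElem?_getD, List.getElem?_eq_none (by simpa using hp), if_neg hp]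
    rfl

lemma foldA_spec (results : List (Int × Int)) (N : Nat) : ∀ k : Nat, k ≤ N →
    ((PySem.List.pyRange 0 (k : Int) 1).foldl
        (fun cs (index : Int) =>
          if index ≥ 1 then
            results.foldl (fun cs r =>
              if PySem.Int.mod r.2 (index + 1) = 0 then
                PySem.List.pySetD cs index (PySem.List.pyGetD cs index 0 + 1)
              else cs) cs
          else PySem.List.pySetD cs index (results.length : Int))
        (List.replicate N 0)).length = N ∧
    ∀ p : Nat, ((PySem.List.pyRange 0 (k : Int) 1).foldl
        (fun cs (index : Int) =>
          if index ≥ 1 then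
            results.foldl (fun cs r =>
              if PySem.Int.mod r.2 (index + 1) = 0 then
                PySem.List.pySetD cs index (PySem.List.pyGetD cs index 0 + 1)
              else cs) cs
          else PySem.List.pySetD cs index (results.length : Int))
        (List.replicate N 0)).getD p 0 = if p < k then refVal results p else 0 := by
  intro k
  induction k with
  | zero =>
      intro _
      rw [show ((0 : Nat) : Int) = 0 from rfl, PySem.List.pyRange_one_eq_nil le_rfl]
      exact ⟨List.length_replicate, fun p => by simp [replicate_getD]⟩
  | succ k ih =>
      intro hk
      obtain ⟨ihl, ihg⟩ := ih (by omega)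
      rw [show ((k + 1 : Nat) : Int) = (k : Int) + 1 from by push_cast; ring,
        PySem.List.pyRange_one_succ_right (by positivity), List.foldl_append]
      simp only [List.foldl_cons, List.foldl_nil]
      by_cases hk1 : (k : Int) ≥ 1
      · rw [if_pos hk1]
        obtain ⟨al, ag⟩ := innerA_spec results (k : Int) ((k : Int) + 1) (by omega) _
          (by rw [ihl]; exact_mod_cast hk)
        refine ⟨al.trans ihl, fun p => ?_⟩
        rw [ag p, ihg p]
        by_cases hpk : p = k
        · subst hpk
          rw [if_neg (by omega), if_pos (by omega : (p : Int) = (p : Int)),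
            if_pos (by omega), refVal, if_neg (by omega)]
          have hcnt : results.countP (fun r => decide (PySem.Int.mod r.2 ((p : Int) + 1) = 0))
              = results.countP (fun r => decide (((p : Int) + 1) ∣ r.2)) :=
            List.countP_congr (fun r _ => by
              simp [PySem.Int.mod_eq_zero_iff_dvd])
          rw [hcnt]
          ring
        · rw [if_neg (by omega : ¬ ((p : Int) = (k : Int)))]
          by_cases hlt : p < k
          · rw [if_pos hlt, if_pos (by omega)]
            ring
          · rw [if_neg hlt, if_neg (by omega)]
            ring
      · rw [if_neg hk1]
        have hk0 : k = 0 := by omega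
        subst hk0
        rw [Nat.cast_zero] at ihl ihg
        rw [Nat.cast_zero,
          PySem.List.pySetD_of_nonneg _ _ (by norm_num : (0 : Int) ≤ 0)]
        refine ⟨by rw [List.length_set, ihl], fun p => ?_⟩
        rw [show ((0 : Int)).toNat = 0 from rfl,
          set_getD _ 0 _ (by rw [ihl]; omega) p, ihg p]
        by_cases hp : p = 0
        · rw [if_pos hp, if_pos (by omega), hp, refVal, if_pos rfl]
        · rw [if_neg hp, if_neg (by omega), if_neg (by omega)]

lemma alt_eq_ref (results : List (Int × Int)) (max_length : Int) :
    estimate_key_length_alt results max_length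
      = (List.range max_length.toNat).map (refVal results) := by
  by_cases hml : max_length ≤ 0
  · have h0 : max_length.toNat = 0 := by omega
    simp [estimate_key_length_alt, hml, h0]
  · have hN1 : 0 < max_length.toNat := by omega
    unfold estimate_key_length_alt
    rw [if_neg hml]
    dsimp only
    rw [PySem.List.pySetD_of_nonneg _ _ (by norm_num : (0 : Int) ≤ 0),
      show ((0 : Int)).toNat = 0 from rfl]
    obtain ⟨fl, fg⟩ := foldB_spec max_length results
      ((List.replicate max_length.toNat (0 : Int)).set 0 (results.length : Int))
      (by rw [List.length_set, List.length_replicate]; omega)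
    apply eq_of_getD
    · rw [fl, List.length_set, List.length_replicate, List.length_map, List.length_range]
    · intro p
      rw [fg p, set_getD _ 0 _ (by rw [List.length_replicate]; omega) p, ref_getD]
      by_cases hp0 : p = 0
      · subst hp0
        rw [if_pos rfl, if_neg (by omega), if_pos hN1, refVal, if_pos rfl]
        ring
      · rw [if_neg hp0, replicate_getD]
        by_cases hpN : p < max_length.toNat
        · rw [if_pos hpN, if_pos (by omega : 1 ≤ p ∧ (p : Int) + 1 ≤ max_length),
            refVal, if_neg hp0]
          ring
        · rw [if_neg hpN, if_neg (by omega : ¬(1 ≤ p ∧ (p : Int) + 1 ≤ max_length))]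
          ring

lemma a_eq_ref (results : List (Int × Int)) (max_length : Int) :
    estimate_key_length results max_length
      = (List.range max_length.toNat).map (refVal results) := by
  unfold estimate_key_length
  dsimp only
  rw [zerosLoop_eq, List.nil_append,
    PySem.List.enumerate_eq_map_pyRange (List.replicate max_length.toNat (0 : Int)) 0,
    List.foldl_map]
  have hlen : PySem.List.len (List.replicate max_length.toNat (0 : Int))
      = ((max_length.toNat : Nat) : Int) := by
    simp [PySem.List.len_eq]
  rw [hlen]
  dsimp only
  obtain ⟨fl, fg⟩ := foldA_spec results max_length.toNat max_length.toNat le_rfl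
  apply eq_of_getD
  · rw [fl, List.length_map, List.length_range]
  · intro p
    rw [fg p, ref_getD]

-- ===== VERDICT (by name: the statement is the Claim_ definition above) =====
theorem estimate_key_length_spec : Claim_equal_estimate_key_length := by
  intro results max_length _
  unfold Spec_estimate_key_length
  rw [a_eq_ref, alt_eq_ref]
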